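-- pv_equiv track=rewrite | github.com/GlobalCan/donna | src/donna/security/validator.py | _has_substring_overlap
-- ===== SOURCE A (Python) =====
-- def _has_substring_overlap(a: str, b: str, min_len: int = 15) -> bool:
--     # Codex adversarial scan #9: this is O(len(b) * len(a)) and runs on
--     # unbounded model text during debate-turn validation. A long prior turn
--     # plus a long current turn could block the worker loop for seconds.
--     # Cap both inputs — debate turns shouldn't need >50k chars of overlap
--     # scanning, and anything longer is almost certainly noise.
--     _MAX_SCAN = 50_000
--     a = a[:_MAX_SCAN]
--     b = b[:_MAX_SCAN]
--     if len(a) < min_len or len(b) < min_len: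
--         return False
--     for i in range(len(b) - min_len):
--         sub = b[i : i + min_len]
--         if sub in a:
--             return True
--     return False
-- ===== SOURCE B (Python) =====
-- def _has_substring_overlap(a: str, b: str, min_len: int = 15) -> bool:
--     if min_len <= 0:
--         return True  # the empty overlap is shared by any two strings
--     a, b = a[:50_000], b[:50_000]
--     if min_len > min(len(a), len(b)):
--         return False
--     windows = {a[j:j + min_len] for j in range(len(a) - min_len + 1)}
--     return any(b[i:i + min_len] in windows for i in range(len(b) - min_len + 1))
-- ===== Notes on version B (the rewrite author's own statement) =====
-- stated objective: alternative
-- what changed: Instead of running a 'sub in a' substring scan of a for every position of b, B returns True outright for a non-positive window length and otherwise precomputes the set of all length-min_len windows of a once and tests each window of b (including the final one) by a set lookup.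
-- intended difference: When the only length-min_len substring of b occurring in a is b's final window (e.g. min_len=0 with b empty), A returns False because its loop 'range(len(b) - min_len)' stops one position early, while B returns True, which is the intended answer to 'does any length-min_len substring of b occur in a'. — e.g. on _has_substring_overlap("ab", "xab", 2): A returns false, B returns true
import Mathlib
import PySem

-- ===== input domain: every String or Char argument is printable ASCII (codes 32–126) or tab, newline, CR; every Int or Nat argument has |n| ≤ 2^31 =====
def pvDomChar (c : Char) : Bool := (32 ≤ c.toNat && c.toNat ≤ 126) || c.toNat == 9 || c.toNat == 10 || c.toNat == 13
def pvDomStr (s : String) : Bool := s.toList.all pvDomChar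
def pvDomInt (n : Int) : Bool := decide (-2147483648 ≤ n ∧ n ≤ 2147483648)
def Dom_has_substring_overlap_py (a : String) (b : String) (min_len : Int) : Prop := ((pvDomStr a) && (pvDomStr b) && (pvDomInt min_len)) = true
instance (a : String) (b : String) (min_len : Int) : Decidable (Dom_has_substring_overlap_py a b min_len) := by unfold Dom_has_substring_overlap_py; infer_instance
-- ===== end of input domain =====

-- B replaces A's per-position 'sub in a' substring scan by one precomputed set of a's windows,
-- looked up per window of b; B checks every window of b including the last one, which A's loop misses.

-- ===== PORT A =====
-- A's 'for i in range(...): if ...: return True' loop with its early return (fuel = remaining indices)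
def pvLoopA (f : Int → Bool) (i : Int) : Nat → Bool
  | 0 => false
  | fuel + 1 => if f i then true else pvLoopA f (i + 1) fuel

def has_substring_overlap_py (a : String) (b : String) (min_len : Int) : Bool :=
  let aL := PySem.List.slice a.toList none (some 50000)
  let bL := PySem.List.slice b.toList none (some 50000)
  if (aL.length : Int) < min_len ∨ (bL.length : Int) < min_len then false
  else
    -- for i in range(len(b) - min_len): if b[i:i+min_len] in a: return True
    pvLoopA (fun i =>
      PySem.Chars.isIn (PySem.List.slice bL (some i) (some (i + min_len))) aL)
      0 ((bL.length : Int) - min_len).toNat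

-- ===== PORT B =====
def has_substring_overlap_py_alt (a : String) (b : String) (min_len : Int) : Bool :=
  if min_len ≤ 0 then true  -- the empty overlap is shared by any two strings
  else
  let aL := PySem.List.slice a.toList none (some 50000)
  let bL := PySem.List.slice b.toList none (some 50000)
  if min_len > min (aL.length : Int) (bL.length : Int) then false
  else
    -- windows = {a[j:j+min_len] for j in range(len(a) - min_len + 1)}
    -- any(b[i:i+min_len] in windows for i in range(len(b) - min_len + 1))
    (PySem.List.pyRange 0 ((bL.length : Int) - min_len + 1) 1).any (fun i =>
      PySem.Set.contains
        (PySem.Set.ofList ((PySem.List.pyRange 0 ((aL.length : Int) - min_len + 1) 1).map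
          (fun j => PySem.List.slice aL (some j) (some (j + min_len)))))
        (PySem.List.slice bL (some i) (some (i + min_len))))

-- ===== PRECONDITION & SPEC =====
-- When the only length-min_len substring of b occurring in a is b's final window, A returns False
-- (its loop 'range(len(b) - min_len)' stops one position early), while B returns True, the intended answer.
def D_has_substring_overlap_py (a : String) (b : String) (min_len : Int) : Prop :=
  let n := min_len.toNat
  let ta := a.toList.take 50000
  let tb := b.toList.take 50000
  0 ≤ min_len ∧ n ≤ tb.length ∧ tb.drop (tb.length - n) <:+: ta ∧
  ∀ k < tb.length - n, ¬ ((tb.drop k).take n <:+: ta)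
instance (a : String) (b : String) (min_len : Int) : Decidable (D_has_substring_overlap_py a b min_len) := by unfold D_has_substring_overlap_py; infer_instance

def Spec_has_substring_overlap_py (a : String) (b : String) (min_len : Int) (out : Bool) : Prop := ¬ D_has_substring_overlap_py a b min_len → out = has_substring_overlap_py_alt a b min_len
instance (a : String) (b : String) (min_len : Int) (out : Bool) : Decidable (Spec_has_substring_overlap_py a b min_len out) := by unfold Spec_has_substring_overlap_py; infer_instance

def pvDiffWitness_has_substring_overlap_py : String × String × Int := ("ab", "xab", 2)
def pvDiffWitnessOut_has_substring_overlap_py : Bool × Bool := (false, true)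

-- ===== CLAIM (what is proved, stated in full; the proofs are below) =====
def Claim_unchanged_has_substring_overlap_py : Prop := ∀ (a : String) (b : String) (min_len : Int), Dom_has_substring_overlap_py a b min_len → Spec_has_substring_overlap_py a b min_len (has_substring_overlap_py a b min_len)
def Claim_changed_has_substring_overlap_py : Prop := Dom_has_substring_overlap_py (pvDiffWitness_has_substring_overlap_py.1) (pvDiffWitness_has_substring_overlap_py.2.1) (pvDiffWitness_has_substring_overlap_py.2.2) ∧ D_has_substring_overlap_py (pvDiffWitness_has_substring_overlap_py.1) (pvDiffWitness_has_substring_overlap_py.2.1) (pvDiffWitness_has_substring_overlap_py.2.2) ∧ has_substring_overlap_py (pvDiffWitness_has_substring_overlap_py.1) (pvDiffWitness_has_substring_overlap_py.2.1) (pvDiffWitness_has_substring_overlap_py.2.2) = pvDiffWitnessOut_has_substring_overlap_py.1 ∧ has_substring_overlap_py_alt (pvDiffWitness_has_substring_overlap_py.1) (pvDiffWitness_has_substring_overlap_py.2.1) (pvDiffWitness_has_substring_overlap_py.2.2) = pvDiffWitnessOut_has_substring_overlap_py.2 ∧ pvDiffWitnessOut_has_substring_overlap_py.1 ≠ pvD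iffWitnessOut_has_substring_overlap_py.2
def Claim_exact_has_substring_overlap_py : Prop := ∀ (a : String) (b : String) (min_len : Int), Dom_has_substring_overlap_py a b min_len → D_has_substring_overlap_py a b min_len → has_substring_overlap_py a b min_len ≠ has_substring_overlap_py_alt a b min_len

-- ===== LEMMAS AND PROOFS =====

-- A's early-return loop is 'any' over the corresponding range
theorem pvLoopA_eq_any_aux (f : Int → Bool) (fuel : Nat) : ∀ i : Int,
    pvLoopA f i fuel = (PySem.List.pyRange i (i + fuel) 1).any f := by
  induction fuel with
  | zero =>
    intro i
    rw [pvLoopA, PySem.List.pyRange_one_eq_nil (by omega)]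
    simp
  | succ fuel ih =>
    intro i
    rw [pvLoopA, PySem.List.pyRange_one_cons (by omega), List.any_cons]
    have harg : i + ((fuel + 1 : Nat) : Int) = (i + 1) + (fuel : Int) := by push_cast; ring
    rw [harg, ← ih (i + 1)]
    cases f i <;> simp

theorem pvLoopA_eq_any (f : Int → Bool) (N : Int) :
    pvLoopA f 0 N.toNat = (PySem.List.pyRange 0 N 1).any f := by
  rw [pvLoopA_eq_any_aux]
  by_cases h : 0 ≤ N
  · have : (0 : Int) + (N.toNat : Int) = N := by omega
    rw [this]
  · rw [PySem.List.pyRange_one_eq_nil (by omega), PySem.List.pyRange_one_eq_nil (by omega)]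

-- a slice whose start is past the end of the list is empty
theorem pv_slice_past (xs : List Char) (s e : Int) (h : (xs.length : Int) ≤ s) :
    PySem.List.slice xs (some s) (some e) = [] := by
  have h1 := PySem.List.length_slice xs s e
  have hc : PySem.List.clampIdx xs.length s = xs.length := by
    simp only [PySem.List.clampIdx]; split_ifs <;> omega
  have hce : PySem.List.clampIdx xs.length e ≤ xs.length := PySem.List.clampIdx_le _ _
  have : (PySem.List.slice xs (some s) (some e)).length = 0 := by omega
  exact List.eq_nil_of_length_eq_zero this

-- an in-range window of nonnegative width is a drop/take
theorem pv_window_eq (bL : List Char) (m i : Int) (hm : 0 ≤ m) (h0 : 0 ≤ i) :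
    PySem.List.slice bL (some i) (some (i + m)) = (bL.drop i.toNat).take m.toNat := by
  rw [PySem.List.slice_toNat bL h0 (by omega)]
  congr 1
  omega

-- B's set-membership test agrees with A's 'sub in a' test on every window of nonnegative width
theorem pv_key (aL bL : List Char) (m i : Int) (hm : 0 ≤ m)
    (h0 : 0 ≤ i) (hi : i + m ≤ (bL.length : Int)) :
    PySem.Set.contains
      (PySem.Set.ofList ((PySem.List.pyRange 0 ((aL.length : Int) - m + 1) 1).map
        (fun j => PySem.List.slice aL (some j) (some (j + m)))))
      (PySem.List.slice bL (some i) (some (i + m)))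
      = PySem.Chars.isIn (PySem.List.slice bL (some i) (some (i + m))) aL := by
  apply Bool.coe_iff_coe.mp
  rw [PySem.Set.contains_iff, PySem.Chars.isIn_iff_infix, PySem.Set.mem_ofList, List.mem_map]
  constructor
  · rintro ⟨j, hj, hseq⟩
    rw [PySem.List.mem_pyRange_one] at hj
    rw [← hseq, pv_window_eq aL m j hm hj.1]
    exact (List.take_prefix _ _).isInfix.trans (List.drop_suffix _ _).isInfix
  · intro hinf
    rw [pv_window_eq bL m i hm h0] at hinf ⊢
    have hwlen : ((bL.drop i.toNat).take m.toNat).length = m.toNat := by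
      simp only [List.length_take, List.length_drop]; omega
    obtain ⟨s, t, hst⟩ := hinf
    refine ⟨(s.length : Int), ?_, ?_⟩
    · rw [PySem.List.mem_pyRange_one]
      have hlen : s.length + m.toNat + t.length = aL.length := by
        rw [← hst]; simp [hwlen]; omega
      constructor
      · positivity
      · omega
    · rw [pv_window_eq aL m _ hm (by positivity)]
      rw [← hst, List.append_assoc]
      have hd : ((s ++ ((bL.drop i.toNat).take m.toNat ++ t)).drop ((s.length : Int)).toNat)
          = (bL.drop i.toNat).take m.toNat ++ t := by
        simp
      rw [hd, List.take_left' hwlen]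

-- the truncation prefix, in slice language and in take language, is the same list
theorem pv_trunc (xs : List Char) :
    PySem.List.slice xs none (some 50000) = xs.take 50000 := by
  rw [PySem.List.slice_to xs (by norm_num : (0:Int) ≤ 50000)]
  rfl

-- D_ (stated with drop/take/IsInfix over truncated lists) in the vocabulary of the ports
theorem pv_D_iff (a b : String) (m : Int) :
    D_has_substring_overlap_py a b m ↔
    (0 ≤ m ∧ m ≤ ((PySem.List.slice a.toList none (some 50000)).length : Int) ∧
     m ≤ ((PySem.List.slice b.toList none (some 50000)).length : Int) ∧
     PySem.Chars.isIn (PySem.List.slice (PySem.List.slice b.toList none (some 50000)) (some (((PySem.List.slice b.toList none (some 50000)).length : Int) - m)) (some ((PySem.List.slice b.toList none (some 50000)).length : Int))) (PySem.List.slice a.toList none (some 50000)) = true ∧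
     (PySem.List.pyRange 0 (((PySem.List.slice b.toList none (some 50000)).length : Int) - m) 1).all (fun i =>
       !PySem.Chars.isIn (PySem.List.slice (PySem.List.slice b.toList none (some 50000)) (some i) (some (i + m))) (PySem.List.slice a.toList none (some 50000))) = true) := by
  unfold D_has_substring_overlap_py
  rw [pv_trunc a.toList, pv_trunc b.toList]
  set aL := a.toList.take 50000
  set bL := b.toList.take 50000
  have hsl : ∀ hm : 0 ≤ m, m ≤ (bL.length : Int) →
      PySem.List.slice bL (some ((bL.length : Int) - m)) (some (bL.length : Int))
        = (bL.drop ((bL.length : Int) - m).toNat).take m.toNat := by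
    intro hm hmb
    have h := pv_window_eq bL m ((bL.length : Int) - m) hm (by omega)
    rw [show ((bL.length : Int) - m + m) = (bL.length : Int) by ring] at h
    exact h
  constructor
  · rintro ⟨hm, hn, hlast, hall⟩
    have hmb : m ≤ (bL.length : Int) := by omega
    have hma : m ≤ (aL.length : Int) := by
      have hle := hlast.length_le
      simp only [List.length_drop] at hle
      omega
    refine ⟨hm, hma, hmb, ?_, ?_⟩
    · rw [hsl hm hmb, PySem.Chars.isIn_iff_infix]
      have h1 : ((bL.length : Int) - m).toNat = bL.length - m.toNat := by omega
      rw [h1]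
      rw [List.take_of_length_le (by simp; omega)]
      exact hlast
    · rw [List.all_eq_true]
      intro i hi
      rw [PySem.List.mem_pyRange_one] at hi
      rw [pv_window_eq bL m i hm hi.1, Bool.not_eq_true', PySem.Chars.isIn_eq_false_iff]
      exact hall i.toNat (by omega)
  · rintro ⟨hm, hma, hmb, hlast, hall⟩
    refine ⟨hm, by omega, ?_, ?_⟩
    · rw [hsl hm hmb, PySem.Chars.isIn_iff_infix] at hlast
      have h1 : ((bL.length : Int) - m).toNat = bL.length - m.toNat := by omega
      rw [h1, List.take_of_length_le (by simp; omega)] at hlast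
      exact hlast
    · intro k hk
      have := List.all_eq_true.mp hall (k : Int) (by rw [PySem.List.mem_pyRange_one]; omega)
      rw [pv_window_eq bL m (k : Int) hm (by positivity), Bool.not_eq_true',
        PySem.Chars.isIn_eq_false_iff] at this
      simpa using this

-- B's last extra window test, as the last index of its range
theorem pv_any_snoc (f : Int → Bool) (N : Int) (h : 0 ≤ N) :
    (PySem.List.pyRange 0 (N + 1) 1).any f = ((PySem.List.pyRange 0 N 1).any f || f N) := by
  rw [PySem.List.pyRange_one_succ_right h, List.any_append]
  simp

-- ===== VERDICT proofs =====
theorem has_substring_overlap_py_spec : Claim_unchanged_has_substring_overlap_py := by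
  intro a b m _ hD
  show has_substring_overlap_py a b m = has_substring_overlap_py_alt a b m
  simp only [has_substring_overlap_py, has_substring_overlap_py_alt]
  rw [pv_D_iff a b m] at hD
  set aL := PySem.List.slice a.toList none (some 50000) with haL
  set bL := PySem.List.slice b.toList none (some 50000) with hbL
  by_cases hm : m ≤ 0
  · rw [if_pos hm, if_neg (by omega : ¬ ((aL.length : Int) < m ∨ (bL.length : Int) < m)),
      pvLoopA_eq_any]
    by_cases hlen : 0 < (bL.length : Int) - m
    · -- A's loop reaches an index whose window is '', found in a
      refine List.any_eq_true.mpr ⟨(bL.length : Int) - m - 1, ?_, ?_⟩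
      · rw [PySem.List.mem_pyRange_one]; omega
      · rcases lt_or_eq_of_le hm with hneg | hz
        · rw [pv_slice_past bL _ _ (by omega)]; exact PySem.Chars.isIn_nil aL
        · rw [hz, pv_window_eq bL 0 ((bL.length : Int) - 0 - 1) le_rfl (by omega)]
          simp only [Int.toNat_zero, List.take_zero]
          exact PySem.Chars.isIn_nil aL
    · -- then m = 0 and b is empty: that input lies inside D_, excluded by hD
      exfalso
      apply hD
      refine ⟨by omega, by omega, by omega, ?_, ?_⟩
      · rw [pv_slice_past bL _ _ (by omega)]; exact PySem.Chars.isIn_nil aL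
      · rw [PySem.List.pyRange_one_eq_nil (by omega)]; simp
  · push_neg at hm
    rw [if_neg (by omega : ¬ m ≤ 0)]
    by_cases hg : (aL.length : Int) < m ∨ (bL.length : Int) < m
    · rw [if_pos hg, if_pos (by omega : m > min (aL.length : Int) (bL.length : Int))]
    · push_neg at hg
      rw [if_neg (by omega : ¬ ((aL.length : Int) < m ∨ (bL.length : Int) < m)),
        if_neg (by omega : ¬ m > min (aL.length : Int) (bL.length : Int)), pvLoopA_eq_any]
      have hm0 : (0 : Int) ≤ m := by omega
      rw [pv_any_snoc _ _ (by omega)]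
      have hcong : (PySem.List.pyRange 0 ((bL.length : Int) - m) 1).any (fun i =>
            PySem.Set.contains
              (PySem.Set.ofList ((PySem.List.pyRange 0 ((aL.length : Int) - m + 1) 1).map
                (fun j => PySem.List.slice aL (some j) (some (j + m)))))
              (PySem.List.slice bL (some i) (some (i + m))))
          = (PySem.List.pyRange 0 ((bL.length : Int) - m) 1).any (fun i =>
            PySem.Chars.isIn (PySem.List.slice bL (some i) (some (i + m))) aL) := by
        apply PySem.List.any_congr_mem
        intro i hi
        rw [PySem.List.mem_pyRange_one] at hi
        exact pv_key aL bL m i hm0 hi.1 (by omega)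
      rw [hcong]
      have hwin : (bL.length : Int) - m + m = (bL.length : Int) := by ring
      rw [hwin]
      have hlastkey := pv_key aL bL m ((bL.length : Int) - m) hm0 (by omega) (by omega)
      rw [hwin] at hlastkey
      rw [hlastkey]
      cases hval : (PySem.List.pyRange 0 ((bL.length : Int) - m) 1).any (fun i =>
          PySem.Chars.isIn (PySem.List.slice bL (some i) (some (i + m))) aL) with
      | true => simp
      | false =>
        -- ¬D, with all bounds holding, says the last window cannot match
        have hall : (PySem.List.pyRange 0 ((bL.length : Int) - m) 1).all (fun i =>
            !PySem.Chars.isIn (PySem.List.slice bL (some i) (some (i + m))) aL) = true := by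
          rw [List.all_eq_true]
          intro i hi
          have := (List.any_eq_false.mp hval) i hi
          simp only [Bool.not_eq_true'] at this ⊢
          simpa using this
        have hlastF : PySem.Chars.isIn (PySem.List.slice bL (some ((bL.length : Int) - m)) (some (bL.length : Int))) aL = false := by
          rw [Bool.eq_false_iff]
          intro hc
          exact hD ⟨hm0, hg.1, hg.2, hc, hall⟩
        rw [hlastF]
        simp

theorem has_substring_overlap_py_changed : Claim_changed_has_substring_overlap_py := by
  unfold Claim_changed_has_substring_overlap_py; decide

theorem has_substring_overlap_py_tight : Claim_exact_has_substring_overlap_py := by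
  intro a b m _ hD
  rw [pv_D_iff a b m] at hD
  simp only [has_substring_overlap_py, has_substring_overlap_py_alt]
  set aL := PySem.List.slice a.toList none (some 50000) with haL
  set bL := PySem.List.slice b.toList none (some 50000) with hbL
  obtain ⟨hm, hma, hmb, hlast, hall⟩ := hD
  rw [if_neg (by omega : ¬ ((aL.length : Int) < m ∨ (bL.length : Int) < m)), pvLoopA_eq_any]
  by_cases hm0 : m ≤ 0
  · -- m = 0: D_ forces b to be empty, so A's loop is empty (false) while B is trivially true
    rw [if_pos hm0]
    have hbl : (bL.length : Int) - m ≤ 0 := by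
      by_contra hpos
      push_neg at hpos
      have h0 := List.all_eq_true.mp hall 0 (by rw [PySem.List.mem_pyRange_one]; omega)
      rw [pv_window_eq bL m 0 hm le_rfl] at h0
      have hz : m = 0 := by omega
      rw [hz] at h0
      simp only [Int.toNat_zero, List.take_zero] at h0
      rw [PySem.Chars.isIn_nil aL] at h0
      simp at h0
    rw [PySem.List.pyRange_one_eq_nil hbl]
    simp
  · rw [if_neg hm0,
      if_neg (by omega : ¬ m > min (aL.length : Int) (bL.length : Int))]
    -- A's side is false: all earlier windows fail
    have hA : (PySem.List.pyRange 0 ((bL.length : Int) - m) 1).any (fun i =>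
        PySem.Chars.isIn (PySem.List.slice bL (some i) (some (i + m))) aL) = false := by
      rw [← Bool.not_eq_true, List.any_eq_true]
      rintro ⟨i, hi, hc⟩
      have := List.all_eq_true.mp hall i hi
      simp only [hc] at this
      exact absurd this (by simp)
    -- B's side is true: the last window matches
    have hB : (PySem.List.pyRange 0 ((bL.length : Int) - m + 1) 1).any (fun i =>
        PySem.Set.contains
          (PySem.Set.ofList ((PySem.List.pyRange 0 ((aL.length : Int) - m + 1) 1).map
            (fun j => PySem.List.slice aL (some j) (some (j + m)))))
          (PySem.List.slice bL (some i) (some (i + m)))) = true := by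
      refine List.any_eq_true.mpr ⟨(bL.length : Int) - m, ?_, ?_⟩
      · rw [PySem.List.mem_pyRange_one]; omega
      · have hwin : (bL.length : Int) - m + m = (bL.length : Int) := by ring
        rw [hwin]
        have hk := pv_key aL bL m ((bL.length : Int) - m) hm (by omega) (by omega)
        rw [hwin] at hk
        rw [hk]
        exact hlast
    rw [hA, hB]
    simp
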